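-- pv_equiv track=rewrite | github.com/YoheiKakiuchi/urdf2webots | urdf2webots/importer.py | convertLUtoUN
-- ===== SOURCE A (Python) =====
-- def convertLUtoUN(s):
--     """Capitalize a string."""
--     r = ''
--     i = 0
--     while i < len(s):
--         if i == 0:
--             r += s[i].upper()
--             i += 1
--         elif s[i] == '_' and i < (len(s) - 1):
--             r += s[i + 1].upper()
--             i += 2
--         else:
--             r += s[i]
--             i += 1
--     return r
-- ===== SOURCE B (Python) =====
-- import re
--
--
-- def convertLUtoUN(s):
--     """Capitalize a string."""
--     if not s:
--         return ''
--     return s[0].upper() + re.sub(r'_(.)', lambda m: m.group(1).upper(), s[1:], flags=re.S)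
-- ===== Notes on version B (the rewrite author's own statement) =====
-- stated objective: faster
-- what changed: Replaced A's index-walking while loop, which grows the result by repeated string concatenation, with one regex substitution pass over the tail that uppercases the character after each underscore, after uppercasing the first character.
import Mathlib
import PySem

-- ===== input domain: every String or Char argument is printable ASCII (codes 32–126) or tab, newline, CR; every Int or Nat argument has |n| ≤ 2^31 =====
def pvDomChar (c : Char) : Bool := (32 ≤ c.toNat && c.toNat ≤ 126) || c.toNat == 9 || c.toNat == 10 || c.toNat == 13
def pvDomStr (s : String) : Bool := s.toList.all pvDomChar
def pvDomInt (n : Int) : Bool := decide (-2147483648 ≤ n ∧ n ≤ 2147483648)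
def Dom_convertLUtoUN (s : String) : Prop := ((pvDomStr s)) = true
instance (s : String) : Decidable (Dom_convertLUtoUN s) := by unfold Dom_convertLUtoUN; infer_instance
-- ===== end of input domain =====

-- B replaces A's index-walking while loop with a single pattern-replacement pass
-- (regex '_(.)' → uppercased group) over the tail; objective: idiomatic.

-- ===== PORT A =====
-- A's while loop: state (i, r), three branches in source order; the guard i < len
-- makes the indexing total (always in range, as in the Python).
def convertLUtoUNLoop (cs : List Char) (i : Nat) (r : List Char) : List Char :=
  if h : i < cs.length then
    if i = 0 then
      convertLUtoUNLoop cs (i + 1) (r ++ [PySem.Chars.upperChar cs[i]])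
    else if hu : cs[i] = '_' ∧ i < cs.length - 1 then
      convertLUtoUNLoop cs (i + 2) (r ++ [PySem.Chars.upperChar (cs[i + 1]'(by have := hu.2; omega))])
    else
      convertLUtoUNLoop cs (i + 1) (r ++ [cs[i]])
  else r
termination_by cs.length - i

def convertLUtoUN (s : String) : String :=
  String.ofList (convertLUtoUNLoop s.toList 0 [])

-- ===== PORT B =====
-- hand port of Source B's re.sub(r'_(.)', λ m, m.group(1).upper(), tail, flags=re.S):
-- exact for this pattern — scan left to right, each '_' followed by any char
-- (re.S: '.' matches newline too) is replaced by that char uppercased.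
def convertLUtoUNSub : List Char → List Char
  | '_' :: c :: rest => PySem.Chars.upperChar c :: convertLUtoUNSub rest
  | c :: rest => c :: convertLUtoUNSub rest
  | [] => []

def convertLUtoUN_alt (s : String) : String :=
  match s.toList with
  | [] => ""
  | c :: rest => String.ofList (PySem.Chars.upperChar c :: convertLUtoUNSub rest)

-- ===== PRECONDITION & SPEC =====
def Spec_convertLUtoUN (s : String) (out : String) : Prop := out = convertLUtoUN_alt s
instance (s : String) (out : String) : Decidable (Spec_convertLUtoUN s out) := by unfold Spec_convertLUtoUN; infer_instance

-- ===== CLAIM (what is proved, stated in full; the proofs are below) =====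
def Claim_equal_convertLUtoUN : Prop := ∀ (s : String), Dom_convertLUtoUN s → Spec_convertLUtoUN s (convertLUtoUN s)

-- ===== LEMMAS AND PROOFS =====

theorem convertLUtoUNSub_cons_ne (c : Char) (rest : List Char) (h : c ≠ '_') :
    convertLUtoUNSub (c :: rest) = c :: convertLUtoUNSub rest := by
  rw [convertLUtoUNSub.eq_def]
  split
  · rename_i c' rest' heq
    injection heq with h1 _
    exact absurd h1 h
  · rename_i heq
    injection heq with h1 h2
    rw [← h1, ← h2]
  · rename_i heq
    simp at heq

-- the loop from any position i ≥ 1 is the pattern-replacement pass on the suffix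
theorem convertLUtoUNLoop_eq_sub (cs : List Char) (i : Nat) (r : List Char) (hi : 1 ≤ i) :
    convertLUtoUNLoop cs i r = r ++ convertLUtoUNSub (cs.drop i) := by
  by_cases h : i < cs.length
  · rw [convertLUtoUNLoop]
    have hi0 : ¬ i = 0 := by omega
    have hdrop : cs.drop i = cs[i] :: cs.drop (i + 1) := (List.getElem_cons_drop h).symm
    by_cases hu : cs[i] = '_' ∧ i < cs.length - 1
    · have h1 : i + 1 < cs.length := by omega
      have hdrop1 : cs.drop (i + 1) = cs[i + 1] :: cs.drop (i + 2) :=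
        (List.getElem_cons_drop h1).symm
      rw [dif_pos h, if_neg hi0, dif_pos hu,
        convertLUtoUNLoop_eq_sub cs (i + 2) _ (by omega), hdrop, hdrop1, hu.1,
        convertLUtoUNSub]
      simp
    · rw [dif_pos h, if_neg hi0, dif_neg hu,
        convertLUtoUNLoop_eq_sub cs (i + 1) _ (by omega), hdrop]
      by_cases hc : cs[i] = '_'
      · have hlast : i = cs.length - 1 := by
          rcases Nat.lt_or_ge i (cs.length - 1) with h' | h'
          · exact absurd ⟨hc, h'⟩ hu
          · omega
        have : cs.drop (i + 1) = [] := List.drop_eq_nil_of_le (by omega)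
        rw [this, hc]
        simp [convertLUtoUNSub]
      · rw [convertLUtoUNSub_cons_ne _ _ hc]
        simp
  · rw [convertLUtoUNLoop, dif_neg h, List.drop_eq_nil_of_le (by omega)]
    simp [convertLUtoUNSub]
termination_by cs.length - i

-- ===== VERDICT (by name: the statement is the Claim_ definition above) =====
theorem convertLUtoUN_spec : Claim_equal_convertLUtoUN := by
  intro s _
  unfold Spec_convertLUtoUN convertLUtoUN convertLUtoUN_alt
  cases hcs : s.toList with
  | nil => rw [convertLUtoUNLoop]; simp
  | cons c rest =>
    rw [convertLUtoUNLoop]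
    have hlen : 0 < (c :: rest).length := by simp
    rw [dif_pos hlen, if_pos rfl, convertLUtoUNLoop_eq_sub _ 1 _ le_rfl]
    simp
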